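-- pv_equiv track=rewrite | github.com/mpistrang/rag-assignment | hybrid-search/ingestion.py | extract_content_sections
-- ===== SOURCE A (Python) =====
-- def extract_content_sections(content: str) -> str:
--     """Extract main content, skipping the metadata header."""
--     lines = content.split("\n")
--     content_lines = []
--     in_content = False
--
--     for line in lines:
--         if line.strip().startswith("###"):
--             in_content = True
--         if in_content:
--             content_lines.append(line)
--
--     return "\n".join(content_lines).strip()
-- ===== SOURCE B (Python) =====
-- def extract_content_sections(content: str) -> str:
--     lines = content.split("\n")
--     idx = next((i for i, l in enumerate(lines) if l.strip().startswith("###")), None)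
--     if idx is None:
--         return ""
--     return "\n".join(lines[idx:]).strip()
-- ===== Notes on version B (the rewrite author's own statement) =====
-- stated objective: simpler
-- what changed: Replaces the running in_content flag with per-line accumulator appends by locating the index of the first header line and returning the joined tail slice.
import Mathlib
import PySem

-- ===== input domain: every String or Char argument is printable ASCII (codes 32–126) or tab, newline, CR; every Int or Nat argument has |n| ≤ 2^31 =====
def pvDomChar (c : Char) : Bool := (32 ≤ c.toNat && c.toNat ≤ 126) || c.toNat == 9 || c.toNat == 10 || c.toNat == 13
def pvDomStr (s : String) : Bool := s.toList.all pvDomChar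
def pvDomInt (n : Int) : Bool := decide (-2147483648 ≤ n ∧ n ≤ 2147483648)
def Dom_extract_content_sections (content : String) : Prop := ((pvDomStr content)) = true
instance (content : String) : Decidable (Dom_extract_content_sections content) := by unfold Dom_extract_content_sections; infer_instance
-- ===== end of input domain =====

-- B replaces A's running in_content flag and per-line accumulator with a locate-then-slice
-- decomposition: find the first header line, then join the tail slice (objective: simpler).

-- ===== PORT A =====
-- the for-loop over the lines, carrying the in_content flag (content_lines built structurally)
def pvLoopA : List String → Bool → List String
  | [], _ => []
  | l :: rest, inc =>
    let inc' := if PySem.Str.startswith (PySem.Str.strip l) "###" then true else inc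
    if inc' then l :: pvLoopA rest inc' else pvLoopA rest inc'

-- content.split("\n"): sep ≠ "", so Str.split? always returns some; getD [] is never taken
def extract_content_sections (content : String) : String :=
  let lines := (PySem.Str.split? content "\n").getD []
  PySem.Str.strip (PySem.Str.join "\n" (pvLoopA lines false))

-- ===== PORT B =====
def extract_content_sections_alt (content : String) : String :=
  let lines := (PySem.Str.split? content "\n").getD []
  match lines.findIdx? (fun l => PySem.Str.startswith (PySem.Str.strip l) "###") with
  | none => ""
  | some i => PySem.Str.strip (PySem.Str.join "\n" (PySem.List.slice lines (some (i : Int)) none))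

-- ===== PRECONDITION & SPEC =====
def Spec_extract_content_sections (content : String) (out : String) : Prop := out = extract_content_sections_alt content
instance (content : String) (out : String) : Decidable (Spec_extract_content_sections content out) := by unfold Spec_extract_content_sections; infer_instance

-- ===== CLAIM (what is proved, stated in full; the proofs are below) =====
def Claim_equal_extract_content_sections : Prop := ∀ (content : String), Dom_extract_content_sections content → Spec_extract_content_sections content (extract_content_sections content)

-- ===== LEMMAS AND PROOFS =====

-- the header test, in the Chars normal form the simp set produces
def pvHdr (l : String) : Bool := PySem.Chars.startswith (PySem.Chars.strip l.toList) ['#', '#', '#']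

lemma pvHdr_eq : (fun l => PySem.Str.startswith (PySem.Str.strip l) "###") = pvHdr := by
  funext l; simp [pvHdr, pysem]

lemma pvHdr_eq' (l : String) :
    PySem.Str.startswith (PySem.Str.strip l) "###" = pvHdr l := by
  simp [pvHdr, pysem]

lemma pvLoopA_cons (l : String) (rest : List String) (inc : Bool) :
    pvLoopA (l :: rest) inc =
      (if (if pvHdr l then true else inc) then l :: pvLoopA rest (if pvHdr l then true else inc)
       else pvLoopA rest (if pvHdr l then true else inc)) := by
  simp only [pvLoopA, pvHdr_eq' l]

-- once the flag is set, every remaining line is kept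
lemma pvLoopA_true (ls : List String) : pvLoopA ls true = ls := by
  induction ls with
  | nil => rfl
  | cons l rest ih => simp [pvLoopA_cons, ih]

-- no header line: nothing is kept
lemma pvLoopA_none (ls : List String) (h : ls.findIdx? pvHdr = none) :
    pvLoopA ls false = [] := by
  induction ls with
  | nil => rfl
  | cons l rest ih =>
    rw [List.findIdx?_cons] at h
    cases hp : pvHdr l with
    | true => simp [hp] at h
    | false =>
      simp [hp] at h
      simp [pvLoopA_cons, hp, ih (by simpa using h)]

-- header test first succeeds at index i: exactly the suffix from i is kept
lemma pvLoopA_some (ls : List String) (i : Nat) (h : ls.findIdx? pvHdr = some i) :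
    pvLoopA ls false = ls.drop i := by
  induction ls generalizing i with
  | nil => simp at h
  | cons l rest ih =>
    rw [List.findIdx?_cons] at h
    cases hp : pvHdr l with
    | true =>
      simp [hp] at h
      subst h
      simp [pvLoopA_cons, hp, pvLoopA_true]
    | false =>
      simp [hp] at h
      obtain ⟨j, hj, hji⟩ := h
      subst hji
      simp [pvLoopA_cons, hp, ih j hj]

-- ===== VERDICT (by name: the statement is the Claim_ definition above) =====
theorem extract_content_sections_spec : Claim_equal_extract_content_sections := by
  intro content _
  unfold Spec_extract_content_sections extract_content_sections extract_content_sections_alt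
  dsimp only
  rw [pvHdr_eq]
  cases h : ((PySem.Str.split? content "\n").getD []).findIdx? pvHdr with
  | none =>
      simp [pvLoopA_none _ h, PySem.Str.join, PySem.Chars.join, PySem.Str.strip,
        PySem.Chars.strip, PySem.Chars.lstrip, PySem.Chars.rstrip, List.intercalate]
  | some i =>
      rw [pvLoopA_some _ i h]; simp [PySem.List.slice_from_natCast]
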